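-- pv_equiv track=rewrite | github.com/bramans/alx-interview | 0x01-lockboxes/0-lockboxes.py | canOpenAll
-- ===== SOURCE A (Python) =====
-- def canOpenAll(lockboxes):
--     '''Checks if all the lockboxes in a list of boxes containing keys
--     (indices) to other lockboxes can be unlocked, starting with the
--     first one unlocked.
--     '''
--     total_boxes = len(lockboxes)
--     unlocked_boxes = set([0])  # Track which boxes are unlocked
--     available_keys = set(lockboxes[0]).difference(set([0]))  # Keys from the first box
--
--     while available_keys:
--         current_key = available_keys.pop()
--         if current_key < 0 or current_key >= total_boxes or current_key in unlocked_boxes: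
--             continue  # Skip invalid or already unlocked boxes
--         unlocked_boxes.add(current_key)
--         available_keys.update(lockboxes[current_key])  # Add new keys from the current box
--
--     return len(unlocked_boxes) == total_boxes  # Return True if all boxes are unlocked
-- ===== SOURCE B (Python) =====
-- def canOpenAll(lockboxes):
--     """Round-based fixpoint: n times, add every in-range key reachable
--     from the current set; all boxes open iff the closure has size n."""
--     n = len(lockboxes)
--     reach = {0}
--     for _ in range(n):
--         reach |= {k for i in reach for k in lockboxes[i] if 0 <= k < n}
--     return len(reach) == n
-- ===== Notes on version B (the rewrite author's own statement) =====
-- stated objective: alternative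
-- what changed: Replaces A's one-key-at-a-time worklist (pop a key from a frontier set, unlock its box, push that box's keys) by n rounds of a whole-frontier closure step that adds every in-range key of the current reachable set at once and finally compares the closure's size with n.
import Mathlib
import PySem

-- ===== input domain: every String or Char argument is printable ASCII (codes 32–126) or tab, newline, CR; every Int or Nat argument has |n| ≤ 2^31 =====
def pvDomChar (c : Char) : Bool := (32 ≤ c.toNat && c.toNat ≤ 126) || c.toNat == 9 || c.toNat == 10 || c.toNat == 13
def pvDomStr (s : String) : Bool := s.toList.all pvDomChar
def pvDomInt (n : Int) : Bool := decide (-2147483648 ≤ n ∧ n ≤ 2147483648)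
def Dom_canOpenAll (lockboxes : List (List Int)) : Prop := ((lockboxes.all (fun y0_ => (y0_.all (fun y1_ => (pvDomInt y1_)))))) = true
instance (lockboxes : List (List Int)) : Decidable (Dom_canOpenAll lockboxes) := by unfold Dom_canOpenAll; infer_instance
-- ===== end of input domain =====

-- B replaces A's one-key-at-a-time worklist with n rounds of a whole-frontier closure step (alternative decomposition, same result).
-- Both programs consume Python sets only through size/membership, so their results are independent of set iteration order.

-- ===== PORT A =====
-- while loop of A: pop a key from the worklist (set pop; result is order-independent,
-- modelled as taking the head), skip invalid/unlocked keys, else unlock and add that box's keys.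
def canOpenAllLoop (lockboxes : List (List Int)) (unlocked work : PySem.Set Int) :
    PySem.Set Int :=
  match work with
  | [] => unlocked
  | k :: rest =>
    if decide (k < 0) || decide ((lockboxes.length : Int) ≤ k) || PySem.Set.contains unlocked k then
      canOpenAllLoop lockboxes unlocked rest
    else
      canOpenAllLoop lockboxes (PySem.Set.add unlocked k)
        (PySem.Set.update rest (PySem.List.pyGetD lockboxes k []))
termination_by (((List.range lockboxes.length).filter
    (fun i : ℕ => decide ((i : Int) ∉ unlocked))).length, work.length)
decreasing_by
  · exact Prod.Lex.right _ (by simp)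
  · rename_i h
    simp only [Bool.or_eq_true, decide_eq_true_eq, PySem.Set.contains_iff, not_or, not_lt,
      not_le] at h
    obtain ⟨⟨h1, h2⟩, h3⟩ := h
    apply Prod.Lex.left
    have hmono : ((List.range lockboxes.length).filter
          (fun i : ℕ => decide ((i : Int) ∉ PySem.Set.add unlocked k))).Sublist
        ((List.range lockboxes.length).filter (fun i : ℕ => decide ((i : Int) ∉ unlocked))) := by
      apply List.monotone_filter_right
      intro a ha
      simp only [decide_eq_true_eq, PySem.Set.mem_add, not_or] at *
      exact ha.1
    have hk : k.toNat ∈ (List.range lockboxes.length).filter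
        (fun i : ℕ => decide ((i : Int) ∉ unlocked)) := by
      simp only [List.mem_filter, List.mem_range, decide_eq_true_eq]
      constructor
      · omega
      · rw [Int.toNat_of_nonneg h1]; exact h3
    have hk2 : k.toNat ∉ (List.range lockboxes.length).filter
        (fun i : ℕ => decide ((i : Int) ∉ PySem.Set.add unlocked k)) := by
      simp [PySem.Set.mem_add, Int.toNat_of_nonneg h1]
    refine lt_of_le_of_ne hmono.length_le (fun heq => ?_)
    exact hk2 (hmono.eq_of_length heq ▸ hk)

def canOpenAll (lockboxes : List (List Int)) : Bool :=
  match PySem.List.pyGet? lockboxes 0 with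
  | none => false   -- Python A raises IndexError here (lockboxes[0]); outside Pre_
  | some box0 =>
    (canOpenAllLoop lockboxes (PySem.Set.ofList ([0] : List Int))
        (PySem.Set.diff (PySem.Set.ofList box0) (PySem.Set.ofList ([0] : List Int)))).length
      == lockboxes.length

-- ===== PORT B =====
-- one round of B: reach |= {k for i in reach for k in lockboxes[i] if 0 <= k < n}
def stepB (lockboxes : List (List Int)) (reach : PySem.Set Int) : PySem.Set Int :=
  PySem.Set.union reach (PySem.Set.ofList
    (reach.flatMap (fun i => (PySem.List.pyGetD lockboxes i []).filter
      (fun k => decide (0 ≤ k) && decide (k < (lockboxes.length : Int))))))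

def canOpenAll_alt (lockboxes : List (List Int)) : Bool :=
  let reach := (List.range lockboxes.length).foldl
    (fun r _ => stepB lockboxes r) (PySem.Set.ofList ([0] : List Int))
  reach.length == lockboxes.length

-- ===== PRECONDITION & SPEC =====
-- Pre_ excludes only the empty list, on which Python A raises IndexError at lockboxes[0].
def Pre_canOpenAll (lockboxes : List (List Int)) : Prop := lockboxes ≠ []
instance (lockboxes : List (List Int)) : Decidable (Pre_canOpenAll lockboxes) := by
  unfold Pre_canOpenAll; infer_instance
def pvWitness_canOpenAll : List (List Int) := [[1], [0]]

def Spec_canOpenAll (lockboxes : List (List Int)) (out : Bool) : Prop := out = canOpenAll_alt lockboxes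
instance (lockboxes : List (List Int)) (out : Bool) : Decidable (Spec_canOpenAll lockboxes out) := by unfold Spec_canOpenAll; infer_instance

-- ===== CLAIM (what is proved, stated in full; the proofs are below) =====
def Claim_equal_canOpenAll : Prop := ∀ (lockboxes : List (List Int)), Dom_canOpenAll lockboxes → Pre_canOpenAll lockboxes → Spec_canOpenAll lockboxes (canOpenAll lockboxes)

-- ===== LEMMAS AND PROOFS =====

def validK (L : List (List Int)) (k : Int) : Prop := 0 ≤ k ∧ k < (L.length : Int)

def relK (L : List (List Int)) (i j : Int) : Prop :=
  validK L j ∧ j ∈ PySem.List.pyGetD L i []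

def ReachK (L : List (List Int)) (x : Int) : Prop :=
  Relation.ReflTransGen (relK L) 0 x

-- a set containing 0 and closed under valid keys contains everything reachable
theorem reach_subset {L : List (List Int)} {V : List Int}
    (h0 : (0 : Int) ∈ V)
    (hcl : ∀ i ∈ V, ∀ j ∈ PySem.List.pyGetD L i [], validK L j → j ∈ V) :
    ∀ x, ReachK L x → x ∈ V := by
  intro x hx
  induction hx with
  | refl => exact h0
  | tail _ h ih => exact hcl _ ih _ h.2 h.1

theorem reachK_valid {L : List (List Int)} (hL : L ≠ []) :
    ∀ x, ReachK L x → validK L x := by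
  intro x hx
  induction hx with
  | refl =>
    refine ⟨le_refl 0, ?_⟩
    have : 0 < L.length := List.length_pos_iff.mpr hL
    exact_mod_cast this
  | tail _ h _ => exact h.1

theorem loopA_spec (L : List (List Int)) (U W : PySem.Set Int) :
    ((0 : Int) ∈ U) →
    (∀ x ∈ U, ReachK L x) →
    (∀ x ∈ W, validK L x → ReachK L x) →
    (∀ i ∈ U, ∀ j ∈ PySem.List.pyGetD L i [], validK L j → j ∈ U ∨ j ∈ W) →
    U.Nodup →
    ((0 : Int) ∈ canOpenAllLoop L U W) ∧
    (∀ x ∈ canOpenAllLoop L U W, ReachK L x) ∧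
    (∀ i ∈ canOpenAllLoop L U W, ∀ j ∈ PySem.List.pyGetD L i [],
        validK L j → j ∈ canOpenAllLoop L U W) ∧
    (canOpenAllLoop L U W).Nodup := by
  fun_induction canOpenAllLoop L U W with
  | case1 U' =>
    intro h0 hUr _ hcl hnd
    exact ⟨h0, hUr, fun i hi j hj hv => (hcl i hi j hj hv).resolve_right (by simp), hnd⟩
  | case2 U' k rest hguard ih =>
    intro h0 hUr hWr hcl hnd
    simp only [Bool.or_eq_true, decide_eq_true_eq, PySem.Set.contains_iff] at hguard
    refine ih h0 hUr (fun x hx => hWr x (List.mem_cons_of_mem _ hx)) ?_ hnd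
    intro i hi j hj hv
    rcases hcl i hi j hj hv with hU | hW
    · exact Or.inl hU
    · rcases List.mem_cons.mp hW with rfl | hr
      · rcases hguard with (hlt | hle) | hmem
        · exact absurd hv.1 (by omega)
        · exact absurd hv.2 (by omega)
        · exact Or.inl hmem
      · exact Or.inr hr
  | case3 U' k rest hguard ih =>
    intro h0 hUr hWr hcl hnd
    simp only [Bool.or_eq_true, decide_eq_true_eq, PySem.Set.contains_iff, not_or, not_lt,
      not_le] at hguard
    obtain ⟨⟨h1, h2⟩, h3⟩ := hguard
    have hRk : ReachK L k := hWr k List.mem_cons_self ⟨h1, h2⟩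
    refine ih ?_ ?_ ?_ ?_ (PySem.Set.nodup_add _ _ hnd)
    · exact (PySem.Set.mem_add _ _ _).mpr (Or.inl h0)
    · intro x hx
      rcases (PySem.Set.mem_add _ _ _).mp hx with hU | rfl
      · exact hUr x hU
      · exact hRk
    · intro x hx hv
      rcases (PySem.Set.mem_update _ _ _).mp hx with hr | hk
      · exact hWr x (List.mem_cons_of_mem _ hr) hv
      · exact Relation.ReflTransGen.tail hRk ⟨hv, hk⟩
    · intro i hi j hj hv
      rcases (PySem.Set.mem_add _ _ _).mp hi with hU | rfl
      · rcases hcl i hU j hj hv with hjU | hjW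
        · exact Or.inl ((PySem.Set.mem_add _ _ _).mpr (Or.inl hjU))
        · rcases List.mem_cons.mp hjW with rfl | hr
          · exact Or.inl ((PySem.Set.mem_add _ _ _).mpr (Or.inr rfl))
          · exact Or.inr ((PySem.Set.mem_update _ _ _).mpr (Or.inl hr))
      · exact Or.inr ((PySem.Set.mem_update _ _ _).mpr (Or.inr hj))

def iterB (L : List (List Int)) (k : ℕ) : PySem.Set Int :=
  (stepB L)^[k] (PySem.Set.ofList ([0] : List Int))

theorem iterB_succ (L : List (List Int)) (k : ℕ) :
    iterB L (k + 1) = stepB L (iterB L k) :=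
  Function.iterate_succ_apply' _ _ _

theorem foldl_eq_iterB (L : List (List Int)) (m : ℕ) :
    (List.range m).foldl (fun r _ => stepB L r) (PySem.Set.ofList ([0] : List Int)) =
      iterB L m := by
  induction m with
  | zero => rfl
  | succ m ih =>
    rw [List.range_succ, List.foldl_append, ih, List.foldl_cons, List.foldl_nil, iterB_succ]

theorem mem_stepB (L : List (List Int)) (r : PySem.Set Int) (x : Int) :
    x ∈ stepB L r ↔ x ∈ r ∨ ∃ i ∈ r, x ∈ PySem.List.pyGetD L i [] ∧ validK L x := by
  simp [stepB, PySem.Set.mem_union, PySem.Set.mem_ofList, List.mem_flatMap, List.mem_filter,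
    validK]

theorem prefix_foldl_add (xs : List Int) : ∀ s : PySem.Set Int,
    s <+: xs.foldl PySem.Set.add s := by
  induction xs with
  | nil => intro s; exact List.prefix_refl s
  | cons x xs ih =>
    intro s
    refine List.IsPrefix.trans ?_ (ih (PySem.Set.add s x))
    rw [PySem.Set.add_eq_ite]
    split
    · exact List.prefix_refl s
    · exact ⟨[x], rfl⟩

theorem prefix_stepB (L : List (List Int)) (r : PySem.Set Int) : r <+: stepB L r :=
  prefix_foldl_add _ r

theorem zero_mem_iterB (L : List (List Int)) (k : ℕ) : (0 : Int) ∈ iterB L k := by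
  induction k with
  | zero => simp [iterB, PySem.Set.mem_ofList]
  | succ k ih =>
    rw [iterB_succ]
    exact (mem_stepB L _ 0).mpr (Or.inl ih)

theorem nodup_iterB (L : List (List Int)) (k : ℕ) : (iterB L k).Nodup := by
  induction k with
  | zero => simp [iterB]
  | succ k ih =>
    rw [iterB_succ]
    exact PySem.Set.nodup_union _ _ ih

theorem sound_iterB (L : List (List Int)) (k : ℕ) :
    ∀ x ∈ iterB L k, ReachK L x := by
  induction k with
  | zero =>
    intro x hx
    simp only [iterB, Function.iterate_zero, id] at hx
    have : x = 0 := by simpa [PySem.Set.mem_ofList] using hx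
    subst this; exact Relation.ReflTransGen.refl
  | succ k ih =>
    intro x hx
    rw [iterB_succ] at hx
    rcases (mem_stepB L _ x).mp hx with hr | ⟨i, hi, hkey, hval⟩
    · exact ih x hr
    · exact Relation.ReflTransGen.tail (ih i hi) ⟨hval, hkey⟩

theorem valid_iterB (L : List (List Int)) (hL : L ≠ []) (k : ℕ) :
    ∀ x ∈ iterB L k, validK L x :=
  fun x hx => reachK_valid hL x (sound_iterB L k x hx)

theorem length_iterB_le (L : List (List Int)) (hL : L ≠ []) (k : ℕ) :
    (iterB L k).length ≤ L.length := by
  have hsub : iterB L k ⊆ (List.range L.length).map (fun n : ℕ => (n : Int)) := by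
    intro x hx
    obtain ⟨hx0, hxn⟩ := valid_iterB L hL k x hx
    have hxnat : x.toNat < L.length := by omega
    exact List.mem_map.mpr ⟨x.toNat, List.mem_range.mpr hxnat, Int.toNat_of_nonneg hx0⟩
  have hnd := nodup_iterB L k
  have := (hnd.subperm hsub).length_le
  simpa using this

theorem growth_iterB (L : List (List Int)) (k : ℕ)
    (h : ∀ j, j < k → stepB L (iterB L j) ≠ iterB L j) :
    k + 1 ≤ (iterB L k).length := by
  induction k with
  | zero =>
    have h0 : iterB L 0 = [0] := rfl
    simp [h0]
  | succ k ih =>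
    have hk : k + 1 ≤ (iterB L k).length := ih (fun j hj => h j (by omega))
    have hne : stepB L (iterB L k) ≠ iterB L k := h k (by omega)
    have hpre : iterB L k <+: iterB L (k + 1) := by
      rw [iterB_succ]
      exact prefix_stepB L _
    have hlt : (iterB L k).length < (iterB L (k + 1)).length := by
      refine lt_of_le_of_ne hpre.length_le (fun heq => ?_)
      have heq2 : iterB L k = iterB L (k + 1) := hpre.eq_of_length heq
      rw [iterB_succ] at heq2
      exact hne heq2.symm
    omega

theorem fix_iterB (L : List (List Int)) (hL : L ≠ []) :
    stepB L (iterB L L.length) = iterB L L.length := by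
  have hex : ∃ j, j < L.length ∧ stepB L (iterB L j) = iterB L j := by
    by_contra hcon
    push Not at hcon
    have h1 := growth_iterB L L.length hcon
    have h2 := length_iterB_le L hL L.length
    omega
  obtain ⟨j, hj, hfix⟩ := hex
  have hstable : ∀ m, j ≤ m → iterB L m = iterB L j := by
    intro m
    induction m with
    | zero => intro hm; have : j = 0 := by omega
              rw [this]
    | succ m ihm =>
      intro hm
      rcases Nat.lt_or_ge j (m + 1) with hlt | hge
      · have hjm : j ≤ m := by omega
        rw [iterB_succ]
        rw [ihm hjm, hfix]
      · have : j = m + 1 := by omega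
        rw [this]
  rw [hstable L.length (by omega), hfix]

theorem mem_iterB_iff (L : List (List Int)) (hL : L ≠ []) (x : Int) :
    x ∈ iterB L L.length ↔ ReachK L x := by
  constructor
  · exact sound_iterB L L.length x
  · refine reach_subset (zero_mem_iterB L L.length) ?_ x
    intro i hi j hj hv
    have hmem : j ∈ stepB L (iterB L L.length) :=
      (mem_stepB L _ j).mpr (Or.inr ⟨i, hi, hj, hv⟩)
    rwa [fix_iterB L hL] at hmem

-- ===== VERDICT (by name: the statement is the Claim_ definition above) =====
theorem canOpenAll_spec : Claim_equal_canOpenAll := by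
  intro L0 _ hpre
  unfold Spec_canOpenAll
  match L0, hpre with
  | b :: rest, _ =>
    have hL : b :: rest ≠ ([] : List (List Int)) := by simp
    have hkeys0 : PySem.List.pyGetD (b :: rest) 0 ([] : List Int) = b :=
      PySem.List.pyGetD_zero_cons _ _ _
    obtain ⟨h0V, hsound, hclosed, hndV⟩ := loopA_spec (b :: rest)
      (PySem.Set.ofList ([0] : List Int))
      (PySem.Set.diff (PySem.Set.ofList b) (PySem.Set.ofList ([0] : List Int)))
      (by simp [PySem.Set.mem_ofList])
      (by
        intro x hx
        have hx0 : x = 0 := by simpa [PySem.Set.mem_ofList] using hx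
        subst hx0; exact Relation.ReflTransGen.refl)
      (by
        intro x hx hv
        have hxb : x ∈ b := by
          have hd := (PySem.Set.mem_diff _ _ _).mp hx
          exact (PySem.Set.mem_ofList _ _).mp hd.1
        exact Relation.ReflTransGen.single ⟨hv, by rwa [hkeys0]⟩)
      (by
        intro i hi j hj hv
        have hi0 : i = 0 := by simpa [PySem.Set.mem_ofList] using hi
        subst hi0
        rw [hkeys0] at hj
        by_cases hj0 : j = 0
        · exact Or.inl (by simp [PySem.Set.mem_ofList, hj0])
        · refine Or.inr ((PySem.Set.mem_diff _ _ _).mpr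
            ⟨(PySem.Set.mem_ofList _ _).mpr hj, ?_⟩)
          simp [PySem.Set.mem_ofList, hj0])
      (by simp)
    have hmemV : ∀ x, x ∈ canOpenAllLoop (b :: rest) (PySem.Set.ofList ([0] : List Int))
        (PySem.Set.diff (PySem.Set.ofList b) (PySem.Set.ofList ([0] : List Int))) ↔
          ReachK (b :: rest) x :=
      fun x => ⟨hsound x, fun hr => reach_subset h0V hclosed x hr⟩
    have hperm : (canOpenAllLoop (b :: rest) (PySem.Set.ofList ([0] : List Int))
        (PySem.Set.diff (PySem.Set.ofList b) (PySem.Set.ofList ([0] : List Int)))).Perm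
          (iterB (b :: rest) (b :: rest).length) := by
      rw [List.perm_ext_iff_of_nodup hndV (nodup_iterB _ _)]
      intro a
      rw [hmemV a, mem_iterB_iff _ hL a]
    show canOpenAll (b :: rest) = canOpenAll_alt (b :: rest)
    rw [canOpenAll, PySem.List.pyGet?_zero_cons]
    rw [canOpenAll_alt]
    simp only [foldl_eq_iterB]
    rw [hperm.length_eq]
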